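-- pv_equiv track=rewrite | github.com/aaronhackney/pycsfw | sample/generate_network_data.py | generate_host_data
-- ===== SOURCE A (Python) =====
-- def generate_host_data(prefix: str, first_octet: int, second_octet: int, third_octet: int, rows: int, obj_type="Host"):
--     host_data = ["NAME,DESCRIPTION,TYPE,VALUE,LOOKUP"]
--     fourth_octet = 1
--     for num in range(1, rows):
--         ip_address = f"{first_octet}.0.{third_octet}.{fourth_octet}"
--         host_data.append(f"{prefix}-{ip_address},Test {obj_type} Object {ip_address},{obj_type},{ip_address},")
--         fourth_octet += 1
--         if fourth_octet == 256:
--             third_octet += 1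
--             fourth_octet = 1
--             if third_octet == 256:
--                 second_octet += 1
--                 third_octet == 1
--                 if second_octet >= 256:
--                     raise ValueError
--     return host_data
-- ===== SOURCE B (Python) =====
-- def generate_host_data(prefix: str, first_octet: int, second_octet: int, third_octet: int, rows: int, obj_type="Host"):
--     # Closed-form, index-based: no carried octet counters.
--     host_data = ["NAME,DESCRIPTION,TYPE,VALUE,LOOKUP"]
--     for num in range(1, rows):
--         k = num - 1
--         ip_address = f"{first_octet}.0.{third_octet + k // 255}.{k % 255 + 1}"
--         host_data.append(f"{prefix}-{ip_address},Test {obj_type} Object {ip_address},{obj_type},{ip_address},")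
--     return host_data
-- ===== Notes on version B (the rewrite author's own statement) =====
-- stated objective: simpler
-- what changed: Replaced the carried octet counters (fourth incrementing with wrap into third, plus the vestigial second/raise bookkeeping) by a closed-form index computation: row k uses third_octet + k//255 and k%255 + 1 directly.
import Mathlib
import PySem

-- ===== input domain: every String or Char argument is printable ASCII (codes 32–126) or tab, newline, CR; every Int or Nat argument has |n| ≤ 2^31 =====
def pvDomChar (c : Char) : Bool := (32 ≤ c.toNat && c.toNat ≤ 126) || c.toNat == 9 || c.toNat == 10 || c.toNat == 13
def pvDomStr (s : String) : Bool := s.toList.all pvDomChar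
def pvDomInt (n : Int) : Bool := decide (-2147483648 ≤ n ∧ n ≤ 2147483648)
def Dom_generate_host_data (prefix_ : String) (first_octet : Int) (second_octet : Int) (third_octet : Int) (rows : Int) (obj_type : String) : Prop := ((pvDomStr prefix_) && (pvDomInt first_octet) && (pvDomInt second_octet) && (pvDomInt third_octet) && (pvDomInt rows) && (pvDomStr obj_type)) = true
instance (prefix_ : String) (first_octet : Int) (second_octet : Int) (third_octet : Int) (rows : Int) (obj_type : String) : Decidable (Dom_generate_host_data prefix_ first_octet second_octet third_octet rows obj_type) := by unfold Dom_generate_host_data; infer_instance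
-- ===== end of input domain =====

-- B replaces A's carried octet counters with a closed-form, index-based computation of each
-- row's third/fourth octet (objective: simpler decomposition, same cost).

-- shared row formatter (the identical f-string of both Pythons)
def pvRow (prefix_ : String) (first_octet : Int) (obj_type : String) (third fourth : Int) : String :=
  let ip := PySem.Int.toStr first_octet ++ ".0." ++ PySem.Int.toStr third ++ "." ++ PySem.Int.toStr fourth
  prefix_ ++ "-" ++ ip ++ ",Test " ++ obj_type ++ " Object " ++ ip ++ "," ++ obj_type ++ "," ++ ip ++ ","

-- ===== PORT A =====
-- A's loop, state (second, third, fourth, acc); fuel = number of iterations of range(1, rows)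
-- (the loop variable 'num' is unused by A's body). Where Python raises ValueError the port
-- stops and returns the list built so far -- those inputs are excluded by Pre_.
-- (Python's no-op comparison 'third_octet == 1' contributes nothing and is not ported.)
def generate_host_data_loop (prefix_ : String) (first_octet : Int) (obj_type : String) :
    Nat → Int → Int → Int → List String → List String
  | 0, _, _, _, acc => acc
  | fuel+1, second, third, fourth, acc =>
    let acc2 := acc ++ [pvRow prefix_ first_octet obj_type third fourth]
    if fourth + 1 = 256 then
      if third + 1 = 256 then
        if second + 1 ≥ 256 then acc2  -- raise ValueError (excluded by Pre_)
        else generate_host_data_loop prefix_ first_octet obj_type fuel (second + 1) (third + 1) 1 acc2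
      else generate_host_data_loop prefix_ first_octet obj_type fuel second (third + 1) 1 acc2
    else generate_host_data_loop prefix_ first_octet obj_type fuel second third (fourth + 1) acc2

def generate_host_data (prefix_ : String) (first_octet : Int) (second_octet : Int) (third_octet : Int) (rows : Int) (obj_type : String) : List String :=
  generate_host_data_loop prefix_ first_octet obj_type (rows - 1).toNat second_octet third_octet 1
    ["NAME,DESCRIPTION,TYPE,VALUE,LOOKUP"]

-- ===== PORT B =====
def generate_host_data_alt (prefix_ : String) (first_octet : Int) (second_octet : Int) (third_octet : Int) (rows : Int) (obj_type : String) : List String :=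
  "NAME,DESCRIPTION,TYPE,VALUE,LOOKUP" ::
    (PySem.List.pyRange 1 rows 1).map (fun num =>
      let k := num - 1
      pvRow prefix_ first_octet obj_type
        (third_octet + PySem.Int.floordiv k 255) (PySem.Int.mod k 255 + 1))

-- ===== PRECONDITION & SPEC =====
-- Pre_ excludes exactly the inputs on which A raises ValueError: second wraps only once
-- (third is never reset), at the iteration where third would reach 256, and only when
-- second_octet + 1 >= 256; that iteration is reached iff rows ≥ 255*(256 - third_octet) + 1.
def Pre_generate_host_data (prefix_ : String) (first_octet : Int) (second_octet : Int) (third_octet : Int) (rows : Int) (obj_type : String) : Prop :=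
  ¬ (second_octet ≥ 255 ∧ third_octet ≤ 255 ∧ rows ≥ 255 * (256 - third_octet) + 1)
instance (prefix_ : String) (first_octet : Int) (second_octet : Int) (third_octet : Int) (rows : Int) (obj_type : String) : Decidable (Pre_generate_host_data prefix_ first_octet second_octet third_octet rows obj_type) := by unfold Pre_generate_host_data; infer_instance

def pvWitness_generate_host_data : String × Int × Int × Int × Int × String := ("net", 10, 0, 3, 5, "Host")

def Spec_generate_host_data (prefix_ : String) (first_octet : Int) (second_octet : Int) (third_octet : Int) (rows : Int) (obj_type : String) (out : List String) : Prop := out = generate_host_data_alt prefix_ first_octet second_octet third_octet rows obj_type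
instance (prefix_ : String) (first_octet : Int) (second_octet : Int) (third_octet : Int) (rows : Int) (obj_type : String) (out : List String) : Decidable (Spec_generate_host_data prefix_ first_octet second_octet third_octet rows obj_type out) := by unfold Spec_generate_host_data; infer_instance

-- ===== CLAIM (what is proved, stated in full; the proofs are below) =====
def Claim_equal_generate_host_data : Prop := ∀ (prefix_ : String) (first_octet : Int) (second_octet : Int) (third_octet : Int) (rows : Int) (obj_type : String), Dom_generate_host_data prefix_ first_octet second_octet third_octet rows obj_type → Pre_generate_host_data prefix_ first_octet second_octet third_octet rows obj_type → Spec_generate_host_data prefix_ first_octet second_octet third_octet rows obj_type (generate_host_data prefix_ first_octet second_octet third_octet rows obj_type)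

-- ===== LEMMAS AND PROOFS =====

lemma pvRow_congr (p : String) (fo : Int) (o : String) {a b a' b' : Int}
    (h1 : a = a') (h2 : b = b') : pvRow p fo o a b = pvRow p fo o a' b' := by rw [h1, h2]

-- Loop invariant: from state (second = s, third = t, fourth = r+1), r ≤ 254, with no
-- ValueError within `fuel` iterations, A's loop appends exactly the closed-form rows.
lemma generate_host_data_loop_eq (prefix_ : String) (first_octet : Int) (obj_type : String) :
    ∀ (fuel : Nat) (t s : Int) (r : Nat) (acc : List String), r ≤ 254 →
    (∀ j, j < fuel → ¬ ((r + j) % 255 = 254 ∧ t + (((r + j) / 255 : Nat) : Int) = 255 ∧ s ≥ 255)) →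
    generate_host_data_loop prefix_ first_octet obj_type fuel s t ((r : Int) + 1) acc =
      acc ++ (List.range fuel).map (fun j =>
        pvRow prefix_ first_octet obj_type (t + (((r + j) / 255 : Nat) : Int)) ((((r + j) % 255 : Nat) : Int) + 1)) := by
  intro fuel
  induction fuel with
  | zero => intro t s r acc _ _; simp [generate_host_data_loop]
  | succ n ih =>
    intro t s r acc hr hnr
    simp only [generate_host_data_loop, List.range_succ_eq_map, List.map_cons, List.map_map,
      Function.comp_def]
    split_ifs with h1 h2 h3
    · exfalso
      exact hnr 0 (by omega) ⟨by omega, by omega, by omega⟩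
    · have e := ih (t + 1) (s + 1) 0
        (acc ++ [pvRow prefix_ first_octet obj_type t ((r : Int) + 1)]) (by omega)
        (by intro j hj hc; obtain ⟨c1, c2, c3⟩ := hc; omega)
      simp only [Nat.cast_zero, zero_add] at e
      rw [e, List.append_assoc]
      congr 1
      simp only [List.singleton_append]
      congr 1
      · exact pvRow_congr _ _ _ (by omega) (by omega)
      · exact List.map_congr_left (fun j hj => pvRow_congr _ _ _ (by omega) (by omega))
    · have e := ih (t + 1) s 0
        (acc ++ [pvRow prefix_ first_octet obj_type t ((r : Int) + 1)]) (by omega)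
        (by
          intro j hj hc
          obtain ⟨c1, c2, c3⟩ := hc
          exact hnr (j + 1) (by omega) ⟨by omega, by omega, c3⟩)
      simp only [Nat.cast_zero, zero_add] at e
      rw [e, List.append_assoc]
      congr 1
      simp only [List.singleton_append]
      congr 1
      · exact pvRow_congr _ _ _ (by omega) (by omega)
      · exact List.map_congr_left (fun j hj => pvRow_congr _ _ _ (by omega) (by omega))
    · rw [show ((r : Int) + 1 + 1) = ((r + 1 : Nat) : Int) + 1 by push_cast; ring]
      have e := ih t s (r + 1)
        (acc ++ [pvRow prefix_ first_octet obj_type t ((r : Int) + 1)]) (by omega)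
        (by
          intro j hj hc
          obtain ⟨c1, c2, c3⟩ := hc
          exact hnr (j + 1) (by omega) ⟨by omega, by omega, c3⟩)
      rw [e, List.append_assoc]
      congr 1
      simp only [List.singleton_append]
      congr 1
      · exact pvRow_congr _ _ _ (by omega) (by omega)
      · exact List.map_congr_left (fun j hj => pvRow_congr _ _ _ (by omega) (by omega))

-- ===== VERDICT (by name: the statement is the Claim_ definition above) =====
theorem generate_host_data_spec : Claim_equal_generate_host_data := by
  intro prefix_ first_octet second_octet third_octet rows obj_type _ hpre
  unfold Spec_generate_host_data generate_host_data generate_host_data_alt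
  rw [PySem.List.pyRange_one]
  set n := (rows - 1).toNat with hn
  have key := generate_host_data_loop_eq prefix_ first_octet obj_type n third_octet second_octet 0
    ["NAME,DESCRIPTION,TYPE,VALUE,LOOKUP"] (by omega)
    (by
      intro j hj hc
      obtain ⟨c1, c2, c3⟩ := hc
      exact hpre ⟨c3, by omega, by omega⟩)
  simp only [Nat.cast_zero, zero_add] at key
  rw [key]
  simp only [List.map_map, Function.comp_def, List.singleton_append]
  congr 1
  apply List.map_congr_left
  intro j hj
  simp only [PySem.Int.floordiv_eq_ediv_of_pos (show (0:Int) < 255 by norm_num),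
    PySem.Int.mod_eq_emod_of_pos (show (0:Int) < 255 by norm_num)]
  exact pvRow_congr _ _ _ (by omega) (by omega)
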